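-- pv_equiv track=rewrite | github.com/AdamZhouSE/pythonHomework | Code/CodeRecords/2206/60696/264052.py | f
-- ===== SOURCE A (Python) =====
-- def f(n):
--     res = 0
--     j = 1
--     for i in range(1,n+1):
--         temp = 1
--         for k in range(1,i+1):
--             temp *= j
--             j += 1
--         res += temp
--     return res
-- ===== SOURCE B (Python) =====
-- def f(n):
--     def prod_range(lo, hi):
--         # product of the integers lo, lo+1, ..., hi-1, by balanced splitting
--         if hi - lo <= 0:
--             return 1
--         if hi - lo == 1:
--             return lo
--         mid = (lo + hi) // 2
--         return prod_range(lo, mid) * prod_range(mid, hi)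
--     res = 0
--     for i in range(1, n + 1):
--         s = i * (i - 1) // 2
--         res += prod_range(s + 1, s + i + 1)
--     return res
-- ===== Notes on version B (the rewrite author's own statement) =====
-- stated objective: alternative
-- what changed: Each block's product is computed independently from its closed-form triangular start offset with a balanced divide-and-conquer range product, instead of A's nested sequential loops carrying a mutable counter j across blocks.
import Mathlib
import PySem

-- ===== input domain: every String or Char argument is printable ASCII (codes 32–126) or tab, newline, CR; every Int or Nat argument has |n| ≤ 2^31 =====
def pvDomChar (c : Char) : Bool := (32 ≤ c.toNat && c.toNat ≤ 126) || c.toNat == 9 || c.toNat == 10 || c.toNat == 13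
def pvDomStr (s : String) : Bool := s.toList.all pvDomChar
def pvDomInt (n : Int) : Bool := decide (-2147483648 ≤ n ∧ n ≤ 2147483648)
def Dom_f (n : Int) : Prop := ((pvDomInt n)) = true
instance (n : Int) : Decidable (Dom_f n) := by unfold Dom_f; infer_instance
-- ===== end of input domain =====

-- B computes each block independently from its closed-form start offset with a
-- balanced divide-and-conquer range product (alternative decomposition, no carried counter).

-- ===== PORT A =====
def f (n : Int) : Int :=
  ((PySem.List.pyRange 1 (n+1) 1).foldl
    (fun (rj : Int × Int) (i : Int) =>
      let tj := (PySem.List.pyRange 1 (i+1) 1).foldl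
          (fun (tj : Int × Int) (_k : Int) => (tj.1 * tj.2, tj.2 + 1)) (1, rj.2)
      (rj.1 + tj.1, tj.2))
    (0, 1)).1

-- ===== PORT B =====
-- product of the integers lo, lo+1, ..., hi-1, by balanced splitting
-- (structural recursion on fuel = range length; each split strictly shrinks the range, so the fuel never runs out)
def prodRangeGo (fuel : Nat) (lo hi : Int) : Int :=
  match fuel with
  | 0 => 1
  | fuel + 1 =>
    if hi - lo ≤ 0 then 1
    else if hi - lo = 1 then lo
    else
      prodRangeGo fuel lo (PySem.Int.floordiv (lo + hi) 2)
        * prodRangeGo fuel (PySem.Int.floordiv (lo + hi) 2) hi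

def prodRange (lo hi : Int) : Int := prodRangeGo (hi - lo).toNat lo hi

def f_alt (n : Int) : Int :=
  (PySem.List.pyRange 1 (n+1) 1).foldl
    (fun (res : Int) (i : Int) =>
      let s := PySem.Int.floordiv (i * (i - 1)) 2
      res + prodRange (s + 1) (s + i + 1)) 0

-- ===== PRECONDITION & SPEC =====
def Spec_f (n : Int) (out : Int) : Prop := out = f_alt n
instance (n : Int) (out : Int) : Decidable (Spec_f n out) := by unfold Spec_f; infer_instance

-- ===== CLAIM (what is proved, stated in full; the proofs are below) =====
def Claim_equal_f : Prop := ∀ (n : Int), Dom_f n → Spec_f n (f n)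

-- ===== LEMMAS AND PROOFS =====

-- product of the integer range [lo, hi)
def R (lo hi : Int) : Int := (PySem.List.pyRange lo hi 1).prod

-- triangular numbers and the common mathematical value of both programs
def Tri : Nat → Int
  | 0 => 0
  | m + 1 => Tri m + (m + 1)

def S : Nat → Int
  | 0 => 0
  | m + 1 => S m + R (Tri m + 1) (Tri m + 1 + (m + 1))

lemma R_empty {lo hi : Int} (h : hi ≤ lo) : R lo hi = 1 := by
  simp [R, PySem.List.pyRange_one_eq_nil h]

lemma R_single (lo : Int) : R lo (lo + 1) = lo := by
  simp [R, PySem.List.pyRange_one_singleton]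

lemma R_split (lo mid hi : Int) (h1 : lo ≤ mid) (h2 : mid ≤ hi) :
    R lo hi = R lo mid * R mid hi := by
  rw [R, PySem.List.pyRange_one_append lo mid hi h1 h2, List.prod_append]; rfl

lemma prodRangeGo_eq (fuel : Nat) (lo hi : Int) (h : (hi - lo).toNat ≤ fuel) :
    prodRangeGo fuel lo hi = R lo hi := by
  induction fuel generalizing lo hi with
  | zero => rw [prodRangeGo, R_empty (by omega)]
  | succ k ih =>
      rw [prodRangeGo]
      have hm : PySem.Int.floordiv (lo + hi) 2 = (lo + hi) / 2 :=
        PySem.Int.floordiv_eq_ediv_of_pos (by norm_num)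
      split_ifs with h0 h1
      · rw [R_empty (by omega)]
      · have : hi = lo + 1 := by omega
        rw [this, R_single]
      · rw [hm, ih _ _ (by omega), ih _ _ (by omega)]
        exact (R_split lo ((lo + hi) / 2) hi (by omega) (by omega)).symm

lemma prodRange_eq (lo hi : Int) : prodRange lo hi = R lo hi :=
  prodRangeGo_eq _ lo hi le_rfl

lemma tri_two (m : Nat) : 2 * Tri m = (m : Int) * (m + 1) := by
  induction m with
  | zero => simp [Tri]
  | succ k ih => simp only [Tri]; push_cast; push_cast at ih; ring_nf; ring_nf at ih; omega

lemma s_eq (m : Nat) :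
    PySem.Int.floordiv (((m : Int) + 1) * (((m : Int) + 1) - 1)) 2 = Tri m := by
  have h : ((m : Int) + 1) * (((m : Int) + 1) - 1) = 2 * Tri m := by
    rw [tri_two]; ring
  rw [h, PySem.Int.floordiv_eq_ediv_of_pos (by norm_num),
    Int.mul_ediv_cancel_left _ (by norm_num)]

-- A's inner loop: multiply in l.length consecutive integers starting at j
lemma inner_fold (l : List Int) (temp j : Int) :
    l.foldl (fun (tj : Int × Int) (_ : Int) => (tj.1 * tj.2, tj.2 + 1)) (temp, j)
      = (temp * R j (j + l.length), j + l.length) := by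
  induction l generalizing temp j with
  | nil => simp [R_empty (le_refl j)]
  | cons x xs ih =>
      simp only [List.foldl_cons, ih, List.length_cons, Prod.mk.injEq]
      push_cast
      have hnn : (0 : Int) ≤ xs.length := Int.natCast_nonneg _
      have harg : j + ((xs.length : Int) + 1) = j + 1 + xs.length := by ring
      have hlt : j < j + 1 + (xs.length : Int) := by omega
      have hR : R j (j + 1 + xs.length) = j * R (j + 1) (j + 1 + xs.length) := by
        rw [R, PySem.List.pyRange_one_cons hlt, List.prod_cons]; rfl
      rw [harg, hR]
      exact ⟨by ring, by ring⟩

-- A's outer loop invariant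
lemma fA_loop (m : Nat) :
    (PySem.List.pyRange 1 ((m : Int) + 1) 1).foldl
      (fun (rj : Int × Int) (i : Int) =>
        let tj := (PySem.List.pyRange 1 (i+1) 1).foldl
            (fun (tj : Int × Int) (_k : Int) => (tj.1 * tj.2, tj.2 + 1)) (1, rj.2)
        (rj.1 + tj.1, tj.2))
      (0, 1) = (S m, Tri m + 1) := by
  induction m with
  | zero => simp [PySem.List.pyRange_one_eq_nil, S, Tri]
  | succ k ih =>
      have hsplit : PySem.List.pyRange 1 (((k : Nat) + 1 : Nat) + 1 : Int) 1
          = PySem.List.pyRange 1 ((k : Int) + 1) 1 ++ [(k : Int) + 1] := by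
        have h1 : (1 : Int) ≤ (k : Int) + 1 := by omega
        have := PySem.List.pyRange_one_succ_right (a := 1) (b := (k : Int) + 1) h1
        rw [← this]; push_cast; ring_nf
      rw [hsplit, List.foldl_append, ih]
      simp only [List.foldl_cons, List.foldl_nil]
      have hlen : ((PySem.List.pyRange 1 ((k : Int) + 1 + 1) 1).length : Int) = (k : Int) + 1 := by
        rw [PySem.List.length_pyRange_one]
        have : ((k : Int) + 1 + 1 - 1) = ((k + 1 : Nat) : Int) := by push_cast; ring
        rw [this, Int.toNat_natCast]; push_cast; ring
      rw [inner_fold, hlen]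
      simp only [S, Tri, Prod.mk.injEq]
      constructor
      · ring_nf
      · ring

-- B's loop invariant
lemma fB_loop (m : Nat) :
    (PySem.List.pyRange 1 ((m : Int) + 1) 1).foldl
      (fun (res : Int) (i : Int) =>
        let s := PySem.Int.floordiv (i * (i - 1)) 2
        res + prodRange (s + 1) (s + i + 1)) 0 = S m := by
  induction m with
  | zero => simp [PySem.List.pyRange_one_eq_nil, S]
  | succ k ih =>
      have hsplit : PySem.List.pyRange 1 (((k : Nat) + 1 : Nat) + 1 : Int) 1
          = PySem.List.pyRange 1 ((k : Int) + 1) 1 ++ [(k : Int) + 1] := by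
        have h1 : (1 : Int) ≤ (k : Int) + 1 := by omega
        have := PySem.List.pyRange_one_succ_right (a := 1) (b := (k : Int) + 1) h1
        rw [← this]; push_cast; ring_nf
      rw [hsplit, List.foldl_append, ih]
      simp only [List.foldl_cons, List.foldl_nil]
      rw [s_eq k, prodRange_eq]
      have harg : Tri k + ((k : Int) + 1) + 1 = Tri k + 1 + ((k : Int) + 1) := by ring
      rw [harg]
      simp only [S]

-- ===== VERDICT (by name: the statement is the Claim_ definition above) =====
theorem f_spec : Claim_equal_f := by
  intro n _
  unfold Spec_f f f_alt
  by_cases h : n ≤ 0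
  · rw [PySem.List.pyRange_one_eq_nil (by omega : n + 1 ≤ 1)]
    simp
  · lift n to ℕ using (by omega : (0:Int) ≤ n) with m
    rw [fA_loop m, fB_loop m]
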